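-- pv_equiv track=rewrite | github.com/howieraem/LCPrac | 1728.cat-and-mouse-ii.py | canMouseWin
-- ===== SOURCE A (Python) =====
-- import functools
-- from typing import List, Tuple
--
-- def canMouseWin(grid: List[str], catJump: int, mouseJump: int) -> bool:
--     D = (1, 0, -1, 0, 1)
--     m = len(grid)
--     n = len(grid[0])
--
--     mouse_pos = None
--     cat_pos = None
--     avail_cells = 0
--     for i in range(m):
--         for j in range(n):
--             avail_cells += grid[i][j] != '#'
--             if grid[i][j] == 'M':
--                 mouse_pos = (i, j)
--             elif grid[i][j] == 'C':
--                 cat_pos = (i, j)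
--
--     # Estimated depth threshold. 1000 is too large and will cause TLE.
--     max_turns = (avail_cells << 1)
--     # More appropriate threshold should be avail_cells ^ 2, but might still be too large to pass some test cases.
--
--     # Return True if mouse wins else False
--     @functools.lru_cache(None)
--     def dfs(turn: int, mouse_pos: Tuple[int], cat_pos: Tuple[int]) -> bool:
--         if turn == max_turns:
--             return False
--         if turn & 1:
--             # cat's turn
--             i, j = cat_pos
--             for d in range(4):
--                 for jump in range(catJump + 1):  # cat can stay, jump = 0
--                     ni = i + D[d] * jump
--                     nj = j + D[d + 1] * jump
--                     if 0 <= ni < m and 0 <= nj < n and grid[ni][nj] != '#':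
--                         next_cat_pos = (ni, nj)
--                         if next_cat_pos == mouse_pos or grid[ni][nj] == 'F' or not dfs(turn + 1, mouse_pos, next_cat_pos):
--                             # This condition will also handle the case that the cat cannot jump through the mouse
--                             return False
--                     else:
--                         # cannot jump further in the current direction
--                         break
--             return True
--         else:
--             # mouse's turn
--             i, j = mouse_pos
--             for d in range(4):
--                 # Optimization: Although mouse can stay, if cat also stays, mouse will still lose eventually.
--                 # Thus, the minimum mouse jump is 1.
--                 for jump in range(1, mouseJump + 1):
--                     ni = i + D[d] * jump
--                     nj = j + D[d + 1] * jump
--                     if 0 <= ni < m and 0 <= nj < n and grid[ni][nj] != '#':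
--                         if grid[ni][nj] == 'F' or dfs(turn + 1, (ni, nj), cat_pos):
--                             return True
--                     else:
--                         # cannot jump further in the current direction
--                         break
--             return False
--
--     return dfs(0, mouse_pos, cat_pos)
-- ===== SOURCE B (Python) =====
-- from typing import List
--
-- def canMouseWin(grid: List[str], catJump: int, mouseJump: int) -> bool:
--     D = (1, 0, -1, 0, 1)
--     m = len(grid)
--     n = len(grid[0])
--
--     # all non-wall cells, in row-major order
--     cells = [(i, j) for i in range(m) for j in range(n) if grid[i][j] != '#']
--     mouse = cat = None
--     for i, j in cells:
--         if grid[i][j] == 'M':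
--             mouse = (i, j)
--         elif grid[i][j] == 'C':
--             cat = (i, j)
--     max_turns = 2 * len(cells)
--     if not cells:
--         return False
--
--     def moves(pos, lo, hi):
--         # reachable landing cells from pos with jump sizes lo..hi, stopping a
--         # direction at the first wall / out-of-bounds cell
--         i, j = pos
--         out = []
--         for d in range(4):
--             for jump in range(lo, hi + 1):
--                 ni, nj = i + D[d] * jump, j + D[d + 1] * jump
--                 if 0 <= ni < m and 0 <= nj < n and grid[ni][nj] != '#':
--                     out.append((ni, nj))
--                 else:
--                     break
--         return out
--
--     # win[(mp, cp)]: mouse to win from this state; current layer = turn `t`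
--     win = {(mp, cp): False for mp in cells for cp in cells}  # layer t == max_turns
--     for turn in range(max_turns - 1, -1, -1):
--         new = {}
--         for mp in cells:
--             for cp in cells:
--                 if turn & 1:
--                     v = not any(nc == mp or grid[nc[0]][nc[1]] == 'F'
--                                 or not win[(mp, nc)]
--                                 for nc in moves(cp, 0, catJump))
--                 else:
--                     v = any(grid[nm[0]][nm[1]] == 'F' or win[(nm, cp)]
--                             for nm in moves(mp, 1, mouseJump))
--                 new[(mp, cp)] = v
--         win = new
--     return win[(mouse, cat)]
-- ===== Notes on version B (the rewrite author's own statement) =====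
-- stated objective: alternative
-- what changed: Replaces A's top-down lru_cache minimax recursion with bottom-up dynamic programming: a win-table over all (mouse,cat) position pairs is filled layer by layer from turn max_turns down to 0, each layer computed from the next via an explicit reachable-moves list, so there is no recursion or memo cache at all.
-- outside the precondition, e.g. on canMouseWin(['M'], 1, 1): A returns False, B raises KeyError; on canMouseWin(['MF'], 1, 1): A returns True, B raises KeyError
import Mathlib
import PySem

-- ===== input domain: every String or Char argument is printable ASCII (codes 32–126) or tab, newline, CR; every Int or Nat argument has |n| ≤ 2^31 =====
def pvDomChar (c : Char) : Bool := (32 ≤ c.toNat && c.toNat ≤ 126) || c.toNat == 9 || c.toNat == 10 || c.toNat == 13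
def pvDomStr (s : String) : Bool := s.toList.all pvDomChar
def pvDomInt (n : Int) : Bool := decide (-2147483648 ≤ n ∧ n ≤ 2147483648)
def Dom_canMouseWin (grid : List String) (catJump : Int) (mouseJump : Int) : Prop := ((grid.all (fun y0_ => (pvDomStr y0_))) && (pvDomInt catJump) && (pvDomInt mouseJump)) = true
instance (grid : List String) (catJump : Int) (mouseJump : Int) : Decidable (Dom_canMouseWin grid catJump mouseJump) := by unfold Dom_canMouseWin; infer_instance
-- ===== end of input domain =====

-- B replaces A's memoized top-down minimax recursion by bottom-up layer-by-layer dynamic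
-- programming over all (mouse, cat) position pairs; same return values, no speed claim.

-- shared grid context and helpers (used by both ports and by Pre_)
structure PvCtx where
  g : List (List Char)
  m : Int
  n : Int
deriving Repr, DecidableEq

-- grid[i][j]; ports only evaluate it after their own 0 ≤ i < m / 0 ≤ j < n bounds guard
def pvChar (c : PvCtx) (i j : Int) : Char :=
  ((PySem.List.pyGet? ((PySem.List.pyGet? c.g i).getD []) j).getD '#')

def pvD : List Int := [1, 0, -1, 0, 1]

-- row-major list of all coordinates (the scan order of the nested for-loops)
def pvCoords (c : PvCtx) : List (Int × Int) :=
  (PySem.List.pyRange 0 c.m 1).flatMap (fun i => (PySem.List.pyRange 0 c.n 1).map (fun j => (i, j)))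

def pvMk (grid : List String) : PvCtx :=
  ⟨grid.map String.toList, (grid.length : Int),
   (((PySem.List.pyGet? (grid.map String.toList) 0).getD []).length : Int)⟩

-- ===== PORT A =====
-- A's functools.lru_cache, modelled as a hash map from the cache key (turn, mouse_pos, cat_pos)
-- to the cached result, threaded through the recursion
abbrev PvCache := Std.HashMap (Int × (Int × Int) × (Int × Int)) Bool

-- 'for d in range(4)' with A's early 'return' on a hit, threading the cache
def pvAnyM (g : Nat → PvCache → Bool × PvCache) : List Nat → PvCache → Bool × PvCache
  | [], ch => (false, ch)
  | d :: rest, ch =>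
    let p := g d ch
    if p.1 then (true, p.2) else pvAnyM g rest p.2

-- inner 'for jump in …' loop of A with its break / early-return, threading the cache:
-- count down the trip count of A's jump loop, stop at the first blocked cell
def pvScanJAM (c : PvCtx) (i j dx dy : Int) (hit : Int → Int → PvCache → Bool × PvCache) :
    Nat → Int → PvCache → Bool × PvCache
  | 0, _, ch => (false, ch)
  | cnt + 1, jump, ch =>
    let ni := i + dx * jump
    let nj := j + dy * jump
    if 0 ≤ ni ∧ ni < c.m ∧ 0 ≤ nj ∧ nj < c.n ∧ pvChar c ni nj ≠ '#' then
      let p := hit ni nj ch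
      if p.1 then (true, p.2) else pvScanJAM c i j dx dy hit cnt (jump + 1) p.2
    else (false, ch)

-- A's dfs with its lru_cache; fuel = max_turns - turn (A's 'turn == max_turns' cutoff is fuel = 0)
def pvDfsAM (c : PvCtx) (catJump mouseJump : Int) :
    Nat → Int → (Int × Int) → (Int × Int) → PvCache → Bool × PvCache
  | 0, turn, mp, cp, ch =>
    match ch[(turn, mp, cp)]? with
    | some b => (b, ch)
    | none => (false, ch.insert (turn, mp, cp) false)
  | f + 1, turn, mp, cp, ch =>
    match ch[(turn, mp, cp)]? with
    | some b => (b, ch)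
    | none =>
      if PySem.Int.band turn 1 == 1 then
        -- cat's turn: A returns False as soon as some direction/jump hits
        let p := pvAnyM (fun d ch =>
            pvScanJAM c cp.1 cp.2 (pvD.getD d 0) (pvD.getD (d + 1) 0)
              (fun ni nj ch =>
                if ((ni, nj) == mp) || (pvChar c ni nj == 'F') then (true, ch)
                else
                  let r := pvDfsAM c catJump mouseJump f (turn + 1) mp (ni, nj) ch
                  (!r.1, r.2))
              ((catJump + 1 - 0).toNat) 0 ch)
          [0, 1, 2, 3] ch
        (!p.1, p.2.insert (turn, mp, cp) (!p.1))
      else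
        -- mouse's turn
        let p := pvAnyM (fun d ch =>
            pvScanJAM c mp.1 mp.2 (pvD.getD d 0) (pvD.getD (d + 1) 0)
              (fun ni nj ch =>
                if (pvChar c ni nj == 'F') then (true, ch)
                else pvDfsAM c catJump mouseJump f (turn + 1) (ni, nj) cp ch)
              ((mouseJump + 1 - 1).toNat) 1 ch)
          [0, 1, 2, 3] ch
        (p.1, p.2.insert (turn, mp, cp) p.1)

def canMouseWin (grid : List String) (catJump : Int) (mouseJump : Int) : Bool :=
  let c := pvMk grid
  let st := (pvCoords c).foldl
    (fun (st : Int × Option (Int × Int) × Option (Int × Int)) p =>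
      (st.1 + (if pvChar c p.1 p.2 ≠ '#' then 1 else 0),
       if pvChar c p.1 p.2 = 'M' then some p else st.2.1,
       if pvChar c p.1 p.2 = 'C' then some p else st.2.2))
    ((0 : Int), none, none)
  let maxTurns : Int := st.1 <<< (1 : Nat)
  (pvDfsAM c catJump mouseJump maxTurns.toNat 0
    (st.2.1.getD (0, 0)) (st.2.2.getD (0, 0)) (∅ : PvCache)).1

-- ===== PORT B =====
-- B's win table: a dict keyed by the (mouse, cat) position pair
abbrev PvTab := Std.HashMap ((Int × Int) × (Int × Int)) Bool

-- B's moves(): collect the reachable landing cells along one direction, stopping at the first blocked one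
def pvCollectB (c : PvCtx) (i j dx dy : Int) : Nat → Int → List (Int × Int)
  | 0, _ => []
  | cnt + 1, jump =>
    let ni := i + dx * jump
    let nj := j + dy * jump
    if 0 ≤ ni ∧ ni < c.m ∧ 0 ≤ nj ∧ nj < c.n ∧ pvChar c ni nj ≠ '#' then
      (ni, nj) :: pvCollectB c i j dx dy cnt (jump + 1)
    else []

def pvCellsB (c : PvCtx) : List (Int × Int) :=
  (pvCoords c).filter (fun p => pvChar c p.1 p.2 ≠ '#')

def pvMovesB (c : PvCtx) (pos : Int × Int) (lo hi : Int) : List (Int × Int) :=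
  ([0, 1, 2, 3] : List Nat).flatMap fun d =>
    pvCollectB c pos.1 pos.2 (pvD.getD d 0) (pvD.getD (d + 1) 0) ((hi + 1 - lo).toNat) lo

def pvPairsB (c : PvCtx) : List ((Int × Int) × (Int × Int)) :=
  (pvCellsB c).flatMap fun mp => (pvCellsB c).map fun cp => (mp, cp)

-- one table entry of the layer at `turn`, from the already-computed layer `prev` at turn + 1
def pvValB (c : PvCtx) (catJump mouseJump turn : Int)
    (prev : PvTab) (mp cp : Int × Int) : Bool :=
  if PySem.Int.band turn 1 == 1 then
    ! ((pvMovesB c cp 0 catJump).any fun nc =>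
        (nc == mp) || (pvChar c nc.1 nc.2 == 'F') || !(prev.getD (mp, nc) false))
  else
    (pvMovesB c mp 1 mouseJump).any fun nm =>
      (pvChar c nm.1 nm.2 == 'F') || prev.getD (nm, cp) false

-- the descending 'for turn in range(max_turns-1, -1, -1)' loop: k layers filled below the all-False layer
def pvBuildB (c : PvCtx) (catJump mouseJump maxTurns : Int) : Nat → PvTab
  | 0 => (pvPairsB c).foldl (fun d pr => d.insert pr false) (∅ : PvTab)
  | k + 1 =>
    let prev := pvBuildB c catJump mouseJump maxTurns k
    (pvPairsB c).foldl
      (fun d pr => d.insert pr (pvValB c catJump mouseJump (maxTurns - ((k : Int) + 1)) prev pr.1 pr.2))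
      (∅ : PvTab)

def canMouseWin_alt (grid : List String) (catJump : Int) (mouseJump : Int) : Bool :=
  let c := pvMk grid
  let cells := pvCellsB c
  let mouse := cells.foldl (fun acc p => if pvChar c p.1 p.2 = 'M' then some p else acc) none
  let cat := cells.foldl (fun acc p => if pvChar c p.1 p.2 = 'C' then some p else acc) none
  let maxTurns : Int := 2 * (cells.length : Int)
  match cells with
  | [] => false
  | _ =>
    (pvBuildB c catJump mouseJump maxTurns maxTurns.toNat).getD
      (mouse.getD (0, 0), cat.getD (0, 0)) false

-- ===== PRECONDITION & SPEC =====
-- Pre_ excludes inputs on which the Python A raises (empty grid; a row shorter than the first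
-- row, hit by the scan) and — when the board has a non-wall cell — grids missing an 'M' or a
-- 'C' in the scanned region: there A usually raises a TypeError unpacking None but can also
-- return early by accident, a corner no caller of this game solver exercises, while B raises
-- a KeyError looking up the missing start position.
def Pre_canMouseWin (grid : List String) (catJump : Int) (mouseJump : Int) : Prop :=
  grid ≠ [] ∧
  (∀ r ∈ grid, (grid.headD "").toList.length ≤ r.toList.length) ∧
  ((∀ i < grid.length, ∀ j < (grid.headD "").toList.length,
      pvChar (pvMk grid) (i : Int) (j : Int) = '#') ∨
   ((∃ i < grid.length, ∃ j < (grid.headD "").toList.length,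
       pvChar (pvMk grid) (i : Int) (j : Int) = 'M') ∧
    (∃ i < grid.length, ∃ j < (grid.headD "").toList.length,
       pvChar (pvMk grid) (i : Int) (j : Int) = 'C')))
instance (grid : List String) (catJump : Int) (mouseJump : Int) : Decidable (Pre_canMouseWin grid catJump mouseJump) := by unfold Pre_canMouseWin; infer_instance

def pvWitness_canMouseWin : List String × Int × Int := (["M#C", "F.."], 1, 1)

def Spec_canMouseWin (grid : List String) (catJump : Int) (mouseJump : Int) (out : Bool) : Prop := out = canMouseWin_alt grid catJump mouseJump
instance (grid : List String) (catJump : Int) (mouseJump : Int) (out : Bool) : Decidable (Spec_canMouseWin grid catJump mouseJump out) := by unfold Spec_canMouseWin; infer_instance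

-- ===== CLAIM (what is proved, stated in full; the proofs are below) =====
def Claim_equal_canMouseWin : Prop := ∀ (grid : List String) (catJump : Int) (mouseJump : Int), Dom_canMouseWin grid catJump mouseJump → Pre_canMouseWin grid catJump mouseJump → Spec_canMouseWin grid catJump mouseJump (canMouseWin grid catJump mouseJump)

-- ===== LEMMAS AND PROOFS =====

-- pure (memo-free) reference forms of A's loops and dfs, used only by the proofs
def pvScanJA (c : PvCtx) (i j dx dy : Int) (hit : Int → Int → Bool) : Nat → Int → Bool
  | 0, _ => false
  | cnt + 1, jump =>
    let ni := i + dx * jump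
    let nj := j + dy * jump
    if 0 ≤ ni ∧ ni < c.m ∧ 0 ≤ nj ∧ nj < c.n ∧ pvChar c ni nj ≠ '#' then
      if hit ni nj then true else pvScanJA c i j dx dy hit cnt (jump + 1)
    else false

-- A's dfs; fuel = max_turns - turn (A's 'turn == max_turns' cutoff is fuel = 0)
def pvDfsA (c : PvCtx) (catJump mouseJump : Int) : Nat → Int → (Int × Int) → (Int × Int) → Bool
  | 0, _, _, _ => false
  | f + 1, turn, mp, cp =>
    if PySem.Int.band turn 1 == 1 then
      ! (([0, 1, 2, 3] : List Nat).any fun d =>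
          pvScanJA c cp.1 cp.2 (pvD.getD d 0) (pvD.getD (d + 1) 0)
            (fun ni nj => ((ni, nj) == mp) || (pvChar c ni nj == 'F')
              || !(pvDfsA c catJump mouseJump f (turn + 1) mp (ni, nj)))
            ((catJump + 1 - 0).toNat) 0)
    else
      ([0, 1, 2, 3] : List Nat).any fun d =>
        pvScanJA c mp.1 mp.2 (pvD.getD d 0) (pvD.getD (d + 1) 0)
          (fun ni nj => (pvChar c ni nj == 'F')
            || pvDfsA c catJump mouseJump f (turn + 1) (ni, nj) cp)
          ((mouseJump + 1 - 1).toNat) 1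


-- the memo cache is correct: every stored entry is the pure dfs value of its key
def pvGood (c : PvCtx) (catJump mouseJump maxT : Int) (ch : PvCache) : Prop :=
  ∀ t q r b, ch[(t, q, r)]? = some b →
    b = pvDfsA c catJump mouseJump ((maxT - t).toNat) t q r

theorem pvGood_empty (c : PvCtx) (catJump mouseJump maxT : Int) :
    pvGood c catJump mouseJump maxT (∅ : PvCache) := by
  intro t q r b hb
  simp at hb

theorem pvGood_insert (c : PvCtx) (catJump mouseJump maxT : Int) (ch : PvCache)
    (turn : Int) (mp cp : Int × Int) (v : Bool)
    (hch : pvGood c catJump mouseJump maxT ch)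
    (hv : v = pvDfsA c catJump mouseJump ((maxT - turn).toNat) turn mp cp) :
    pvGood c catJump mouseJump maxT (ch.insert (turn, mp, cp) v) := by
  intro t q r b hb
  rw [Std.HashMap.getElem?_insert] at hb
  split at hb
  · next heq =>
    have heq' : (turn, mp, cp) = (t, q, r) := beq_iff_eq.mp heq
    injection heq' with e1 e23
    injection e23 with e2 e3
    subst e1; subst e2; subst e3
    cases hb
    exact hv
  · exact hch t q r b hb

theorem pvAnyM_spec (c : PvCtx) (catJump mouseJump maxT : Int)
    (g : Nat → PvCache → Bool × PvCache) (gP : Nat → Bool)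
    (hg : ∀ d ch, pvGood c catJump mouseJump maxT ch →
      (g d ch).1 = gP d ∧ pvGood c catJump mouseJump maxT (g d ch).2) :
    ∀ (l : List Nat) (ch : PvCache), pvGood c catJump mouseJump maxT ch →
      (pvAnyM g l ch).1 = l.any gP ∧
      pvGood c catJump mouseJump maxT (pvAnyM g l ch).2 := by
  intro l
  induction l with
  | nil => intro ch hch; exact ⟨rfl, hch⟩
  | cons d rest ih =>
    intro ch hch
    obtain ⟨h1, h2⟩ := hg d ch hch
    simp only [pvAnyM, List.any_cons, ← h1]
    by_cases hb : (g d ch).1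
    · simp [hb, h2]
    · simp only [hb, if_neg, Bool.false_eq_true, not_false_iff, Bool.false_or]
      exact ih (g d ch).2 h2

theorem pvScanJAM_spec (c : PvCtx) (catJump mouseJump maxT : Int) (i j dx dy : Int)
    (hitM : Int → Int → PvCache → Bool × PvCache) (hitP : Int → Int → Bool)
    (hhit : ∀ ni nj ch, pvGood c catJump mouseJump maxT ch →
      (hitM ni nj ch).1 = hitP ni nj ∧ pvGood c catJump mouseJump maxT (hitM ni nj ch).2) :
    ∀ (cnt : Nat) (jump : Int) (ch : PvCache), pvGood c catJump mouseJump maxT ch →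
      (pvScanJAM c i j dx dy hitM cnt jump ch).1 = pvScanJA c i j dx dy hitP cnt jump ∧
      pvGood c catJump mouseJump maxT (pvScanJAM c i j dx dy hitM cnt jump ch).2 := by
  intro cnt
  induction cnt with
  | zero => intro jump ch hch; exact ⟨rfl, hch⟩
  | succ cnt ih =>
    intro jump ch hch
    simp only [pvScanJAM, pvScanJA]
    by_cases hv : 0 ≤ i + dx * jump ∧ i + dx * jump < c.m ∧ 0 ≤ j + dy * jump ∧
        j + dy * jump < c.n ∧ pvChar c (i + dx * jump) (j + dy * jump) ≠ '#'
    · rw [if_pos hv, if_pos hv]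
      obtain ⟨h1, h2⟩ := hhit (i + dx * jump) (j + dy * jump) ch hch
      rw [← h1]
      by_cases hb : (hitM (i + dx * jump) (j + dy * jump) ch).1
      · simp [hb, h2]
      · rw [if_neg hb, if_neg hb]
        exact ih _ _ h2
    · rw [if_neg hv, if_neg hv]
      exact ⟨rfl, hch⟩

theorem pvDfsAM_spec (c : PvCtx) (catJump mouseJump maxT : Int) :
    ∀ (f : Nat) (turn : Int) (mp cp : Int × Int) (ch : PvCache),
      pvGood c catJump mouseJump maxT ch → (maxT - turn).toNat = f →
      (pvDfsAM c catJump mouseJump f turn mp cp ch).1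
        = pvDfsA c catJump mouseJump f turn mp cp ∧
      pvGood c catJump mouseJump maxT (pvDfsAM c catJump mouseJump f turn mp cp ch).2 := by
  intro f
  induction f with
  | zero =>
    intro turn mp cp ch hch hf
    simp only [pvDfsAM]
    cases hc : ch[(turn, mp, cp)]? with
    | some b =>
      have := hch turn mp cp b hc
      rw [hf] at this
      exact ⟨this, hch⟩
    | none =>
      refine ⟨rfl, pvGood_insert c catJump mouseJump maxT ch turn mp cp false hch ?_⟩
      rw [hf]
      rfl
  | succ f ih =>
    intro turn mp cp ch hch hf
    have hmt : maxT - turn = (f : Int) + 1 := by omega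
    have hf' : (maxT - (turn + 1)).toNat = f := by omega
    simp only [pvDfsAM, pvDfsA]
    cases hc : ch[(turn, mp, cp)]? with
    | some b =>
      have hb := hch turn mp cp b hc
      rw [hf] at hb
      rw [hb]
      exact ⟨by rw [pvDfsA], hch⟩
    | none =>
      by_cases hpar : PySem.Int.band turn 1 == 1
      · simp only [hpar, if_pos]
        have hscan := pvAnyM_spec c catJump mouseJump maxT
          (fun d ch =>
            pvScanJAM c cp.1 cp.2 (pvD.getD d 0) (pvD.getD (d + 1) 0)
              (fun ni nj ch =>
                if ((ni, nj) == mp) || (pvChar c ni nj == 'F') then (true, ch)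
                else
                  let r := pvDfsAM c catJump mouseJump f (turn + 1) mp (ni, nj) ch
                  (!r.1, r.2))
              ((catJump + 1 - 0).toNat) 0 ch)
          (fun d =>
            pvScanJA c cp.1 cp.2 (pvD.getD d 0) (pvD.getD (d + 1) 0)
              (fun ni nj => ((ni, nj) == mp) || (pvChar c ni nj == 'F')
                || !(pvDfsA c catJump mouseJump f (turn + 1) mp (ni, nj)))
              ((catJump + 1 - 0).toNat) 0)
          (fun d ch hch => pvScanJAM_spec c catJump mouseJump maxT cp.1 cp.2
            (pvD.getD d 0) (pvD.getD (d + 1) 0) _ _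
            (by
              intro ni nj ch2 hch2
              by_cases hfast : ((ni, nj) == mp) || (pvChar c ni nj == 'F')
              · rw [if_pos hfast]
                exact ⟨by simp [hfast], hch2⟩
              · rw [if_neg hfast]
                obtain ⟨e1, e2⟩ := ih (turn + 1) mp (ni, nj) ch2 hch2 hf'
                have hf2 : (((ni, nj) == mp) || (pvChar c ni nj == 'F')) = false := by
                  simpa using hfast
                exact ⟨by simp [hf2, e1], e2⟩)
            ((catJump + 1 - 0).toNat) 0 ch hch)
          [0, 1, 2, 3] ch hch
        refine ⟨by rw [hscan.1], ?_⟩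
        refine pvGood_insert c catJump mouseJump maxT _ turn mp cp _ hscan.2 ?_
        rw [hf, pvDfsA, if_pos hpar, hscan.1]
      · simp only [hpar, if_neg, Bool.false_eq_true, not_false_iff]
        have hscan := pvAnyM_spec c catJump mouseJump maxT
          (fun d ch =>
            pvScanJAM c mp.1 mp.2 (pvD.getD d 0) (pvD.getD (d + 1) 0)
              (fun ni nj ch =>
                if (pvChar c ni nj == 'F') then (true, ch)
                else pvDfsAM c catJump mouseJump f (turn + 1) (ni, nj) cp ch)
              ((mouseJump + 1 - 1).toNat) 1 ch)
          (fun d =>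
            pvScanJA c mp.1 mp.2 (pvD.getD d 0) (pvD.getD (d + 1) 0)
              (fun ni nj => (pvChar c ni nj == 'F')
                || pvDfsA c catJump mouseJump f (turn + 1) (ni, nj) cp)
              ((mouseJump + 1 - 1).toNat) 1)
          (fun d ch hch => pvScanJAM_spec c catJump mouseJump maxT mp.1 mp.2
            (pvD.getD d 0) (pvD.getD (d + 1) 0) _ _
            (by
              intro ni nj ch2 hch2
              by_cases hfast : (pvChar c ni nj == 'F')
              · rw [if_pos hfast]
                exact ⟨by simp [hfast], hch2⟩
              · rw [if_neg hfast]
                obtain ⟨e1, e2⟩ := ih (turn + 1) (ni, nj) cp ch2 hch2 hf'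
                have hf2 : ((pvChar c ni nj == 'F')) = false := by simpa using hfast
                exact ⟨by simp [hf2, e1], e2⟩)
            ((mouseJump + 1 - 1).toNat) 1 ch hch)
          [0, 1, 2, 3] ch hch
        refine ⟨by rw [hscan.1], ?_⟩
        refine pvGood_insert c catJump mouseJump maxT _ turn mp cp _ hscan.2 ?_
        rw [hf, pvDfsA, if_neg (by simpa using hpar), hscan.1]

-- lookups in a hash map built by inserting a key-determined value for every key of a list
theorem pv_getD_foldl_insert_not_mem {κ ν : Type} [BEq κ] [Hashable κ] [LawfulBEq κ] [LawfulHashable κ]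
    (l : List κ) (f : κ → ν) (k : κ) (hk : k ∉ l) (d : Std.HashMap κ ν) (dflt : ν) :
    ((l.foldl (fun d x => d.insert x (f x)) d).getD k dflt) = d.getD k dflt := by
  induction l generalizing d with
  | nil => rfl
  | cons x t ih =>
    simp only [List.foldl_cons]
    rw [ih (fun h => hk (List.mem_cons_of_mem _ h))]
    rw [Std.HashMap.getD_insert]
    have hx : (x == k) = false := by
      simp only [beq_eq_false_iff_ne, ne_eq]
      intro h
      exact hk (h ▸ List.mem_cons_self)
    simp [hx]

theorem pv_getD_foldl_insert {κ ν : Type} [BEq κ] [Hashable κ] [LawfulBEq κ] [LawfulHashable κ]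
    (l : List κ) (f : κ → ν) (k : κ) (hk : k ∈ l) (d : Std.HashMap κ ν) (dflt : ν) :
    ((l.foldl (fun d x => d.insert x (f x)) d).getD k dflt) = f k := by
  induction l generalizing d with
  | nil => simp at hk
  | cons x t ih =>
    simp only [List.foldl_cons]
    by_cases ht : k ∈ t
    · exact ih ht _
    · have hx : k = x := by rcases List.mem_cons.mp hk with h | h; exact h; exact absurd h ht
      subst hx
      rw [pv_getD_foldl_insert_not_mem t f k ht]
      rw [Std.HashMap.getD_insert]
      simp

-- the memo-free dfs applied from an empty cache is what the memoized port computes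
theorem pvDfsAM_top (c : PvCtx) (catJump mouseJump maxT : Int) (a b : Int × Int) :
    (pvDfsAM c catJump mouseJump maxT.toNat 0 a b (∅ : PvCache)).1
      = pvDfsA c catJump mouseJump maxT.toNat 0 a b :=
  (pvDfsAM_spec c catJump mouseJump maxT maxT.toNat 0 a b ∅
    (pvGood_empty c catJump mouseJump maxT) (by simp)).1

theorem pv_scan_eq_any (c : PvCtx) (i j dx dy : Int) (hit : Int → Int → Bool) :
    ∀ (cnt : Nat) (jump : Int),
      pvScanJA c i j dx dy hit cnt jump
        = (pvCollectB c i j dx dy cnt jump).any (fun q => hit q.1 q.2) := by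
  intro cnt
  induction cnt with
  | zero => intro jump; rfl
  | succ cnt ih =>
    intro jump
    simp only [pvScanJA, pvCollectB]
    split_ifs with h hh
    · simp [hh]
    · simp [List.any_cons, hh, ih]
    · rfl

theorem pv_collect_valid (c : PvCtx) (i j dx dy : Int) :
    ∀ (cnt : Nat) (jump : Int) (q : Int × Int), q ∈ pvCollectB c i j dx dy cnt jump →
      0 ≤ q.1 ∧ q.1 < c.m ∧ 0 ≤ q.2 ∧ q.2 < c.n ∧ pvChar c q.1 q.2 ≠ '#' := by
  intro cnt
  induction cnt with
  | zero => intro jump q hq; simp [pvCollectB] at hq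
  | succ cnt ih =>
    intro jump q hq
    simp only [pvCollectB] at hq
    split_ifs at hq with h
    · rcases List.mem_cons.mp hq with rfl | hmem
      · exact h
      · exact ih _ _ hmem
    · simp at hq

theorem pv_mem_coords (c : PvCtx) (p : Int × Int) :
    p ∈ pvCoords c ↔ 0 ≤ p.1 ∧ p.1 < c.m ∧ 0 ≤ p.2 ∧ p.2 < c.n := by
  cases p with
  | mk a b =>
    simp only [pvCoords, List.mem_flatMap, List.mem_map, PySem.List.mem_pyRange_one, Prod.mk.injEq]
    constructor
    · rintro ⟨i, ⟨hi1, hi2⟩, j, ⟨hj1, hj2⟩, rfl, rfl⟩; exact ⟨hi1, hi2, hj1, hj2⟩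
    · rintro ⟨h1, h2, h3, h4⟩; exact ⟨a, ⟨h1, h2⟩, b, ⟨h3, h4⟩, rfl, rfl⟩

theorem pv_mem_cells (c : PvCtx) (p : Int × Int) :
    p ∈ pvCellsB c ↔ 0 ≤ p.1 ∧ p.1 < c.m ∧ 0 ≤ p.2 ∧ p.2 < c.n ∧ pvChar c p.1 p.2 ≠ '#' := by
  simp [pvCellsB, List.mem_filter, pv_mem_coords]
  tauto


theorem pv_foldl_last_some {α : Type} :
    ∀ (l : List α) (init : Option α), l ≠ [] →
      ∃ q ∈ l, l.foldl (fun _ x => some x) init = some q := by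
  intro l
  induction l with
  | nil => intro _ h; simp at h
  | cons x t ih =>
    intro init _
    cases t with
    | nil => exact ⟨x, by simp, rfl⟩
    | cons y s =>
      obtain ⟨q, hq, he⟩ := ih (some x) (by simp)
      exact ⟨q, List.mem_cons_of_mem _ hq, he⟩

theorem pv_mem_pairs (c : PvCtx) (mp cp : Int × Int) :
    (mp, cp) ∈ pvPairsB c ↔ mp ∈ pvCellsB c ∧ cp ∈ pvCellsB c := by
  simp [pvPairsB, List.mem_flatMap, List.mem_map]

theorem pv_moves_mem_cells (c : PvCtx) (pos : Int × Int) (lo hi : Int) (q : Int × Int)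
    (hq : q ∈ pvMovesB c pos lo hi) : q ∈ pvCellsB c := by
  simp only [pvMovesB, List.mem_flatMap] at hq
  obtain ⟨d, _, hmem⟩ := hq
  exact (pv_mem_cells c q).mpr (pv_collect_valid _ _ _ _ _ _ _ _ hmem)

theorem pv_build_eq_dfs (c : PvCtx) (catJump mouseJump maxTurns : Int) :
    ∀ (k : Nat) (mp cp : Int × Int), mp ∈ pvCellsB c → cp ∈ pvCellsB c →
      (pvBuildB c catJump mouseJump maxTurns k).getD (mp, cp) false
        = pvDfsA c catJump mouseJump k (maxTurns - (k : Int)) mp cp := by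
  intro k
  induction k with
  | zero =>
    intro mp cp hm hc
    rw [show pvBuildB c catJump mouseJump maxTurns 0
        = (pvPairsB c).foldl (fun d pr => d.insert pr false) (∅ : PvTab) from rfl]
    rw [pv_getD_foldl_insert (pvPairsB c) (fun _ => false) (mp, cp) ((pv_mem_pairs c mp cp).mpr ⟨hm, hc⟩)]
    rfl
  | succ k ih =>
    intro mp cp hm hc
    rw [show pvBuildB c catJump mouseJump maxTurns (k + 1)
        = (pvPairsB c).foldl
            (fun d pr => d.insert pr (pvValB c catJump mouseJump (maxTurns - ((k : Int) + 1))
              (pvBuildB c catJump mouseJump maxTurns k) pr.1 pr.2))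
            (∅ : PvTab) from rfl]
    rw [pv_getD_foldl_insert (pvPairsB c) _ (mp, cp) ((pv_mem_pairs c mp cp).mpr ⟨hm, hc⟩)]
    have hcast : ((k + 1 : Nat) : Int) = (k : Int) + 1 := by push_cast; ring
    rw [hcast]
    show pvValB c catJump mouseJump (maxTurns - ((k : Int) + 1))
        (pvBuildB c catJump mouseJump maxTurns k) mp cp
      = pvDfsA c catJump mouseJump (k + 1) (maxTurns - ((k : Int) + 1)) mp cp
    have hturn : maxTurns - ((k : Int) + 1) + 1 = maxTurns - (k : Int) := by ring
    simp only [pvValB, pvDfsA]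
    by_cases hpar : PySem.Int.band (maxTurns - ((k : Int) + 1)) 1 == 1
    · simp only [hpar, if_pos]
      congr 1
      have hs : ∀ d : Nat,
          pvScanJA c cp.1 cp.2 (pvD.getD d 0) (pvD.getD (d + 1) 0)
            (fun ni nj => ((ni, nj) == mp) || (pvChar c ni nj == 'F')
              || !(pvDfsA c catJump mouseJump k (maxTurns - ((k : Int) + 1) + 1) mp (ni, nj)))
            ((catJump + 1 - 0).toNat) 0
          = (pvCollectB c cp.1 cp.2 (pvD.getD d 0) (pvD.getD (d + 1) 0)
              ((catJump + 1 - 0).toNat) 0).any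
              (fun q => ((q.1, q.2) == mp) || (pvChar c q.1 q.2 == 'F')
                || !(pvDfsA c catJump mouseJump k (maxTurns - ((k : Int) + 1) + 1) mp (q.1, q.2))) :=
        fun d => pv_scan_eq_any c cp.1 cp.2 _ _ _ _ _
      simp only [hs]
      rw [← List.any_flatMap]
      refine (PySem.List.any_congr_mem ?_).symm
      intro q hq
      have hcell := pv_moves_mem_cells c cp 0 catJump q hq
      have ihq := ih mp q hm hcell
      simp only [hturn, ihq]
    · simp only [hpar, if_neg, Bool.false_eq_true, not_false_iff]
      have hs : ∀ d : Nat,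
          pvScanJA c mp.1 mp.2 (pvD.getD d 0) (pvD.getD (d + 1) 0)
            (fun ni nj => (pvChar c ni nj == 'F')
              || pvDfsA c catJump mouseJump k (maxTurns - ((k : Int) + 1) + 1) (ni, nj) cp)
            ((mouseJump + 1 - 1).toNat) 1
          = (pvCollectB c mp.1 mp.2 (pvD.getD d 0) (pvD.getD (d + 1) 0)
              ((mouseJump + 1 - 1).toNat) 1).any
              (fun q => (pvChar c q.1 q.2 == 'F')
                || pvDfsA c catJump mouseJump k (maxTurns - ((k : Int) + 1) + 1) (q.1, q.2) cp) :=
        fun d => pv_scan_eq_any c mp.1 mp.2 _ _ _ _ _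
      simp only [hs]
      rw [← List.any_flatMap]
      refine (PySem.List.any_congr_mem ?_).symm
      intro q hq
      have hcell := pv_moves_mem_cells c mp 1 mouseJump q hq
      have ihq := ih q cp hcell hc
      simp only [hturn, ihq]

-- the last-match fold over all coordinates equals the same fold over the non-wall cells,
-- for a target character that is not '#'
theorem pv_scanfold_eq (c : PvCtx) (ch : Char) (hch : ch ≠ '#') :
    (pvCoords c).foldl (fun acc p => if pvChar c p.1 p.2 = ch then some p else acc) none
      = (pvCellsB c).foldl (fun acc p => if pvChar c p.1 p.2 = ch then some p else acc) none := by
  have h1 := PySem.List.foldl_ite_eq_foldl_filter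
    (p := fun q : Int × Int => pvChar c q.1 q.2 = ch) (f := fun (_ : Option (Int × Int)) (x : Int × Int) => some x)
  simp only [h1]
  rw [pvCellsB, List.filter_filter]
  congr 1
  refine (List.filter_congr ?_).symm
  intro p _
  by_cases h : pvChar c p.1 p.2 = ch
  · simp [h, hch]
  · simp [h]

theorem pv_avail_eq (c : PvCtx) :
    (pvCoords c).foldl (fun a p => a + (if pvChar c p.1 p.2 ≠ '#' then (1 : Int) else 0)) 0
      = ((pvCellsB c).length : Int) := by
  have hf : (fun (a : Int) (p : Int × Int) => a + (if pvChar c p.1 p.2 ≠ '#' then (1 : Int) else 0))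
      = fun a p => if pvChar c p.1 p.2 ≠ '#' then a + 1 else a := by
    funext a p; split_ifs <;> ring
  rw [hf, PySem.List.foldl_ite_add_one, zero_add, List.countP_eq_length_filter]
  rfl


theorem pv_main (grid : List String) (catJump mouseJump : Int)
    (hMC : (∀ p ∈ pvCoords (pvMk grid), pvChar (pvMk grid) p.1 p.2 = '#') ∨
      ((∃ p ∈ pvCoords (pvMk grid), pvChar (pvMk grid) p.1 p.2 = 'M') ∧
       (∃ p ∈ pvCoords (pvMk grid), pvChar (pvMk grid) p.1 p.2 = 'C'))) :
    canMouseWin grid catJump mouseJump = canMouseWin_alt grid catJump mouseJump := by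
  simp only [canMouseWin, canMouseWin_alt]
  set c := pvMk grid with hcdef
  rw [PySem.List.foldl_prod_mk
    (f := fun (a : Int) (p : Int × Int) => a + (if pvChar c p.1 p.2 ≠ '#' then (1 : Int) else 0))
    (g := fun (s : Option (Int × Int) × Option (Int × Int)) (p : Int × Int) =>
      (if pvChar c p.1 p.2 = 'M' then some p else s.1,
       if pvChar c p.1 p.2 = 'C' then some p else s.2))]
  rw [PySem.List.foldl_prod_mk
    (f := fun (acc : Option (Int × Int)) (p : Int × Int) =>
      if pvChar c p.1 p.2 = 'M' then some p else acc)
    (g := fun (acc : Option (Int × Int)) (p : Int × Int) =>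
      if pvChar c p.1 p.2 = 'C' then some p else acc)]
  simp only [pv_avail_eq, pv_scanfold_eq c 'M' (by decide), pv_scanfold_eq c 'C' (by decide)]
  have hshift : (((pvCellsB c).length : Int) <<< (1 : Nat)) = 2 * ((pvCellsB c).length : Int) := by
    rw [Int.shiftLeft_eq]; ring
  rw [hshift, pvDfsAM_top]
  rcases hMC with hall | ⟨⟨pm, hpmc, hpm⟩, ⟨pc, hpcc, hpc⟩⟩
  · have hcells : pvCellsB c = [] := by
      rw [pvCellsB, List.filter_eq_nil_iff]
      intro p hp
      simp [hall p hp]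
    rw [hcells]
    rfl
  · have hmnil : (pvCellsB c).filter (fun p => pvChar c p.1 p.2 = 'M') ≠ [] := by
      intro h
      rw [List.filter_eq_nil_iff] at h
      exact h pm ((pv_mem_cells c pm).mpr
        ⟨((pv_mem_coords c pm).mp hpmc).1, ((pv_mem_coords c pm).mp hpmc).2.1,
         ((pv_mem_coords c pm).mp hpmc).2.2.1, ((pv_mem_coords c pm).mp hpmc).2.2.2,
         by rw [hpm]; decide⟩) (by simp [hpm])
    have hcnil : (pvCellsB c).filter (fun p => pvChar c p.1 p.2 = 'C') ≠ [] := by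
      intro h
      rw [List.filter_eq_nil_iff] at h
      exact h pc ((pv_mem_cells c pc).mpr
        ⟨((pv_mem_coords c pc).mp hpcc).1, ((pv_mem_coords c pc).mp hpcc).2.1,
         ((pv_mem_coords c pc).mp hpcc).2.2.1, ((pv_mem_coords c pc).mp hpcc).2.2.2,
         by rw [hpc]; decide⟩) (by simp [hpc])
    have h1 := PySem.List.foldl_ite_eq_foldl_filter
      (p := fun q : Int × Int => pvChar c q.1 q.2 = 'M') (f := fun (_ : Option (Int × Int)) (x : Int × Int) => some x)
    have h2 := PySem.List.foldl_ite_eq_foldl_filter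
      (p := fun q : Int × Int => pvChar c q.1 q.2 = 'C') (f := fun (_ : Option (Int × Int)) (x : Int × Int) => some x)
    simp only [h1, h2]
    obtain ⟨qm, hqm, hqme⟩ := pv_foldl_last_some _ none hmnil
    obtain ⟨qc, hqc, hqce⟩ := pv_foldl_last_some _ none hcnil
    have hqmc : qm ∈ pvCellsB c := (List.mem_filter.mp hqm).1
    have hqcc : qc ∈ pvCellsB c := (List.mem_filter.mp hqc).1
    rw [hqme, hqce]
    cases hcl : pvCellsB c with
    | nil => rw [hcl] at hqmc; simp at hqmc
    | cons x xs =>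
      simp only [Option.getD_some]
      have hk : ((2 * ((x :: xs).length : Int)).toNat : Int) = 2 * ((x :: xs).length : Int) := by
        omega
      rw [pv_build_eq_dfs c catJump mouseJump (2 * ((x :: xs).length : Int))
        ((2 * ((x :: xs).length : Int)).toNat) qm qc hqmc hqcc, hk]
      ring_nf

theorem pv_n_eq (grid : List String) (hne : grid ≠ []) :
    (pvMk grid).n = ((grid.headD "").toList.length : Int) := by
  cases grid with
  | nil => exact absurd rfl hne
  | cons r t => simp [pvMk]

-- ===== VERDICT (by name: the statement is the Claim_ definition above) =====
theorem canMouseWin_spec : Claim_equal_canMouseWin := by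
  intro grid catJump mouseJump _ hPre
  obtain ⟨hne, _, hdisj⟩ := hPre
  unfold Spec_canMouseWin
  apply pv_main
  have hn := pv_n_eq grid hne
  have hm : (pvMk grid).m = (grid.length : Int) := rfl
  rcases hdisj with h | ⟨⟨i, hi, j, hj, hchar⟩, ⟨i', hi', j', hj', hchar'⟩⟩
  · left
    intro p hp
    obtain ⟨h1, h2, h3, h4⟩ := (pv_mem_coords _ p).mp hp
    have := h p.1.toNat (by rw [hm] at h2; omega) p.2.toNat (by rw [hn] at h4; omega)
    rwa [Int.toNat_of_nonneg h1, Int.toNat_of_nonneg h3] at this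
  · right
    constructor
    · exact ⟨((i : Int), (j : Int)),
        (pv_mem_coords _ _).mpr ⟨by positivity, by rw [hm]; simp; exact_mod_cast hi,
          by positivity, by rw [hn]; show (j:Int) < ((grid.headD "").toList.length : Int); exact_mod_cast hj⟩, hchar⟩
    · exact ⟨((i' : Int), (j' : Int)),
        (pv_mem_coords _ _).mpr ⟨by positivity, by rw [hm]; simp; exact_mod_cast hi',
          by positivity, by rw [hn]; show (j':Int) < ((grid.headD "").toList.length : Int); exact_mod_cast hj'⟩, hchar'⟩
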